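-- pv_equiv track=rewrite | github.com/LukhaGian/ScientificComputing | numbers/project1.py | largest_multi_admissible
-- ===== SOURCE A (Python) =====
-- def number2base_rep(n, b):
--     """
--     Function that takes 2 integers and returns
--     the representation in base b of n
--     """
--     rep = "" # Initialize the string
--     while n > 0:
--         rem = n % b
--         n = n // b
--         rep = str(rem)+rep
--     return rep
--
-- def admissible(n, b):
--     """
--     Function that takes integer n and returns
--     if n is b-admissible
--     """
--     # First, generate the n_b (string)
--     n_b = number2base_rep(n, b)
--     is_admissible = True
--     # Now, we know that a substring z of n_b s.t
--     # it exists a neighbouring substring y of z,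
--     # of course len(z) <= len(n_b) // 2
--     upper = len(n_b) // 2
--     # Now, we check for every substring of length i <= upper
--     i = 1
--     while (i <= upper):
--         # we create a list that contains all the substrings of length i
--         list = []
--         head = 0 # head of the substring
--         tail = i # tail of the substring
--         while tail <= len(n_b):
--             list.append(n_b[head:tail])
--             head += 1
--             tail += 1
--         # Given the list of substrings of length i,
--         # we check if there are equal and contiguous substrings
--         # OBS: contiguous substrings are far away i-1 spaces in the list (meaning between 2 contiguous substrings there are i-1 other substrings)
--         j = 0
--         jump = i
--         while ((j+jump) <= len(list)-1):
--             if (list[j] == list[j+jump]): # if the contiguous substrings are the same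
--                 is_admissible = False
--                 # break both cycles
--                 j = len(list)
--                 i = upper+1
--             else:
--                 j += 1                   # otherwise, check the next substrings
--         i += 1
--     return is_admissible
--
-- def largest_multi_admissible(L, start, end):
--     """
--     Function that takes a list of bases b L and
--     returns the biggest number n s.t. start <= n < end
--     which is b-admissible for all the bases b in L
--     It returns None if no such number exist
--     """
--     largest_admissible = None
--     for i in range(start, end): # We check for all the numbers n
--         for j in range(len(L)): # We check all the bases in list L
--             if (admissible(i, L[j]) == False):
--                 break # We break the cycle if for the j-th base i is not b-admissible
--             elif j == len(L)-1:
--                 largest_admissible = i # otherwise, if we're at the final base, we update the value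
--     return largest_admissible
-- ===== SOURCE B (Python) =====
-- def _to_base(n, b):
--     """Base-b representation of n, built recursively (matches str-digit concatenation)."""
--     if n <= 0:
--         return ''
--     q, r = divmod(n, b)
--     return _to_base(q, b) + str(r)
--
-- def _squarefree(s):
--     """True iff s contains no two equal adjacent blocks (no 'square' substring)."""
--     m = len(s)
--     return not any(s[p:p + k] == s[p + k:p + 2 * k]
--                    for k in range(1, m // 2 + 1)
--                    for p in range(m - 2 * k + 1))
--
-- def largest_multi_admissible(L, start, end):
--     # no bases -> no number qualifies (matches the specification: None when none exists)
--     if not L: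
--         return None
--     # scan downward: the first number admissible in every base is the largest
--     for n in range(end - 1, start - 1, -1):
--         if all(_squarefree(_to_base(n, b)) for b in L):
--             return n
--     return None
-- ===== Notes on version B (the rewrite author's own statement) =====
-- stated objective: alternative
-- what changed: B scans the range downward and returns the first number admissible in all bases (early exit) instead of A's full upward scan with an accumulator, builds the base-b representation by recursion on divmod instead of A's while-loop string prepending, and tests square-freeness by direct slice comparisons over all (length, position) pairs instead of A's materialised list of all substrings with an index-jump inner loop and break-by-assignment.
-- outside the precondition, e.g. on largest_multi_admissible([2, 0], 3, 4): A returns None, B returns None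
import Mathlib
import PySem

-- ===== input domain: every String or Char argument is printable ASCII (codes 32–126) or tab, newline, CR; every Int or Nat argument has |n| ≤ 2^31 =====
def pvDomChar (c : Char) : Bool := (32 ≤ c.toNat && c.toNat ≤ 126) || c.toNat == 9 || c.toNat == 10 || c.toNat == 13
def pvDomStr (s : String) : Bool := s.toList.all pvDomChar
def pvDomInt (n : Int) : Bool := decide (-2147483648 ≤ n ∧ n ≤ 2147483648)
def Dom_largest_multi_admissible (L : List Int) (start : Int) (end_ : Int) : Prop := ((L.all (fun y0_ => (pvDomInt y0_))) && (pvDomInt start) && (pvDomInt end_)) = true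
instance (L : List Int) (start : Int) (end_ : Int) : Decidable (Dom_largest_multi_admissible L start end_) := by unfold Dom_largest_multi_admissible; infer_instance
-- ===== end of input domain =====

-- B replaces A's upward scan-and-overwrite by a downward scan with early exit, A's while-loop
-- string prepending by recursion on divmod, and A's materialised substring list by direct slice
-- comparisons (objective: alternative).  Strings are carried as List Char (PySem.Chars side).

-- ===== PORT A =====
-- number2base_rep's while loop, fueled: n.toNat+1 iterations always suffice on the inputs
-- admitted by Pre_ (each step at least halves a positive n when b ≥ 2; one step when b < 0).
def pvN2bAuxA (fuel : Nat) (n b : Int) (rep : List Char) : List Char :=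
  match fuel with
  | 0 => rep
  | f + 1 =>
    if n > 0 then
      pvN2bAuxA f (PySem.Int.floordiv n b) b (PySem.Int.toChars (PySem.Int.mod n b) ++ rep)
    else rep

def pvNumber2baseRepA (n b : Int) : List Char := pvN2bAuxA (n.toNat + 1) n b []

-- the substring-collecting while loop of `admissible` (head/tail walk); fuel len+1 suffices
def pvSubsAuxA (fuel : Nat) (nb : List Char) (head tail : Int) (acc : List (List Char)) :
    List (List Char) :=
  match fuel with
  | 0 => acc
  | f + 1 =>
    if tail ≤ (nb.length : Int) then
      pvSubsAuxA f nb (head + 1) (tail + 1) (acc ++ [PySem.List.slice nb (some head) (some tail)])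
    else acc

-- the inner while loop over j (break encoded exactly as A does: j := len(list), i := upper+1);
-- list[j] is pvGetD with in-range guaranteed by the loop condition; returns (is_admissible, i)
def pvInnerA (fuel : Nat) (lst : List (List Char)) (jump j : Int) (isadm : Bool) (i upper : Int) :
    Bool × Int :=
  match fuel with
  | 0 => (isadm, i)
  | f + 1 =>
    if j + jump ≤ (lst.length : Int) - 1 then
      if PySem.List.pyGetD lst j [] == PySem.List.pyGetD lst (j + jump) [] then
        pvInnerA f lst jump ((lst.length : Int)) false (upper + 1) upper
      else
        pvInnerA f lst jump (j + 1) isadm i upper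
    else (isadm, i)

-- the outer while loop over i of `admissible`
def pvOuterA (fuel : Nat) (nb : List Char) (upper i : Int) (isadm : Bool) : Bool :=
  match fuel with
  | 0 => isadm
  | f + 1 =>
    if i ≤ upper then
      let lst := pvSubsAuxA (nb.length + 1) nb 0 i []
      let r := pvInnerA (lst.length + 1) lst i 0 isadm i upper
      pvOuterA f nb upper (r.2 + 1) r.1
    else isadm

def pvAdmissibleA (n b : Int) : Bool :=
  let nb := pvNumber2baseRepA n b
  let upper := PySem.Int.floordiv (nb.length : Int) 2
  pvOuterA (upper.toNat + 1) nb upper 1 true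

-- the inner `for j in range(len(L))` loop of A with its break / elif-update; L[j] is pyGetD,
-- in range by the loop bounds
def pvBasesA (i : Int) (L : List Int) (js : List Int) (largest : Option Int) : Option Int :=
  match js with
  | [] => largest
  | j :: rest =>
    if pvAdmissibleA i (PySem.List.pyGetD L j 0) == false then largest
    else if j == (L.length : Int) - 1 then pvBasesA i L rest (some i)
    else pvBasesA i L rest largest

def largest_multi_admissible (L : List Int) (start : Int) (end_ : Int) : Option Int :=
  (PySem.List.pyRange start end_ 1).foldl
    (fun acc i => pvBasesA i L (PySem.List.pyRange 0 (L.length : Int) 1) acc) none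

-- ===== PORT B =====
-- _to_base: recursion on divmod
def pvToBaseB (fuel : Nat) (n b : Int) : List Char :=
  match fuel with
  | 0 => []
  | f + 1 =>
    if n ≤ 0 then []
    else pvToBaseB f (PySem.Int.floordiv n b) b ++ PySem.Int.toChars (PySem.Int.mod n b)

-- _squarefree: no equal adjacent blocks, by direct slice comparison
def pvSquarefreeB (s : List Char) : Bool :=
  let m : Int := (s.length : Int)
  !((PySem.List.pyRange 1 (PySem.Int.floordiv m 2 + 1) 1).any fun k =>
      (PySem.List.pyRange 0 (m - 2 * k + 1) 1).any fun p =>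
        PySem.List.slice s (some p) (some (p + k)) ==
          PySem.List.slice s (some (p + k)) (some (p + 2 * k)))

-- the `all(...)` generator of B's loop body
def pvGoodB (L : List Int) (n : Int) : Bool :=
  L.all fun b => pvSquarefreeB (pvToBaseB (n.toNat + 1) n b)

-- B's downward for loop with early return
def pvAltLoopB (L : List Int) (ns : List Int) : Option Int :=
  match ns with
  | [] => none
  | n :: rest => if pvGoodB L n then some n else pvAltLoopB L rest

def largest_multi_admissible_alt (L : List Int) (start : Int) (end_ : Int) : Option Int :=
  if L = [] then none
  else pvAltLoopB L (PySem.List.pyRange (end_ - 1) (start - 1) (-1))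

-- ===== PRECONDITION & SPEC =====
-- Pre_ excludes lists containing a base 0 or 1 when the range reaches a positive number: on such
-- inputs Python A raises ZeroDivisionError or loops forever in number2base_rep — except when an
-- earlier base's inadmissibility always breaks first, which is conservatively excluded too (cite).
def Pre_largest_multi_admissible (L : List Int) (start : Int) (end_ : Int) : Prop :=
  (∀ b ∈ L, b ≠ 0 ∧ b ≠ 1) ∨ end_ ≤ start ∨ end_ ≤ 1
instance (L : List Int) (start : Int) (end_ : Int) :
    Decidable (Pre_largest_multi_admissible L start end_) := by
  unfold Pre_largest_multi_admissible; infer_instance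

def pvWitness_largest_multi_admissible : List Int × Int × Int := ([2, 3], 1, 12)

def Spec_largest_multi_admissible (L : List Int) (start : Int) (end_ : Int) (out : Option Int) : Prop := out = largest_multi_admissible_alt L start end_
instance (L : List Int) (start : Int) (end_ : Int) (out : Option Int) : Decidable (Spec_largest_multi_admissible L start end_ out) := by unfold Spec_largest_multi_admissible; infer_instance

-- ===== CLAIM (what is proved, stated in full; the proofs are below) =====
def Claim_equal_largest_multi_admissible : Prop := ∀ (L : List Int) (start : Int) (end_ : Int), Dom_largest_multi_admissible L start end_ → Pre_largest_multi_admissible L start end_ → Spec_largest_multi_admissible L start end_ (largest_multi_admissible L start end_)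

-- ===== LEMMAS AND PROOFS =====

-- A's digit-prepending loop equals B's recursion with the digit appended, for every fuel
lemma pvN2b_eq (f : Nat) : ∀ (n b : Int) (rep : List Char),
    pvN2bAuxA f n b rep = pvToBaseB f n b ++ rep := by
  induction f with
  | zero => intro n b rep; rfl
  | succ f ih =>
    intro n b rep
    simp only [pvN2bAuxA, pvToBaseB]
    by_cases h : n > 0
    · rw [if_pos h, if_neg (by omega), ih, List.append_assoc]
    · rw [if_neg h, if_pos (by omega), List.nil_append]

-- the substring-collecting loop produces the mapped range of slices
lemma pvSubs_eq (nb : List Char) (d : Int) :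
    ∀ (f : Nat) (head : Int) (acc : List (List Char)),
    ((nb.length : Int) - (head + d) + 1).toNat < f →
    pvSubsAuxA f nb head (head + d) acc =
      acc ++ (PySem.List.pyRange head ((nb.length : Int) - d + 1) 1).map
        (fun h => PySem.List.slice nb (some h) (some (h + d))) := by
  intro f
  induction f with
  | zero => intro head acc hf; omega
  | succ f ih =>
    intro head acc hf
    simp only [pvSubsAuxA]
    by_cases h : head + d ≤ (nb.length : Int)
    · rw [if_pos h, PySem.List.pyRange_one_cons (by omega), List.map_cons]
      have : head + d + 1 = (head + 1) + d := by omega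
      rw [this, ih (head + 1) _ (by omega)]
      simp
    · rw [if_neg h, PySem.List.pyRange_one_eq_nil (by omega)]
      simp

-- the inner j-loop is an `any` over the remaining positions
lemma pvInner_eq (lst : List (List Char)) (jump : Int) (hj : 1 ≤ jump) :
    ∀ (f : Nat) (j i upper : Int), 0 ≤ j → ((lst.length : Int) - jump - j).toNat < f →
    pvInnerA f lst jump j true i upper =
      (if (PySem.List.pyRange j ((lst.length : Int) - jump) 1).any
            (fun q => PySem.List.pyGetD lst q [] == PySem.List.pyGetD lst (q + jump) [])
        then (false, upper + 1) else (true, i)) := by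
  intro f
  induction f with
  | zero => intro j i upper h0 hf; omega
  | succ f ih =>
    intro j i upper h0 hf
    simp only [pvInnerA]
    by_cases hc : j + jump ≤ (lst.length : Int) - 1
    · rw [if_pos hc, PySem.List.pyRange_one_cons (by omega)]
      by_cases he : PySem.List.pyGetD lst j [] = PySem.List.pyGetD lst (j + jump) []
      · rw [if_pos (by simp [he])]
        obtain ⟨f', rfl⟩ : ∃ f', f = f' + 1 := ⟨f - 1, by omega⟩
        simp only [pvInnerA]
        rw [if_neg (by omega)]
        simp [he]
      · rw [if_neg (by simp [he]), ih (j + 1) i upper (by omega) (by omega)]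
        simp only [List.any_cons, Bool.or_eq_true, beq_iff_eq, he, false_or]
    · rw [if_neg hc, PySem.List.pyRange_one_eq_nil (by omega)]
      simp

-- the outer i-loop is (the negation of) an `any` over block lengths, phrased with B's slices
lemma pvOuter_eq (nb : List Char) (upper : Int) (hu : 2 * upper ≤ (nb.length : Int)) :
    ∀ (f : Nat) (i : Int), 1 ≤ i → (upper + 1 - i).toNat < f →
    pvOuterA f nb upper i true =
      !((PySem.List.pyRange i (upper + 1) 1).any fun k =>
          (PySem.List.pyRange 0 ((nb.length : Int) - 2 * k + 1) 1).any fun p =>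
            PySem.List.slice nb (some p) (some (p + k)) ==
              PySem.List.slice nb (some (p + k)) (some (p + 2 * k))) := by
  intro f
  induction f with
  | zero => intro i h1 hf; omega
  | succ f ih =>
    intro i h1 hf
    simp only [pvOuterA]
    by_cases hi : i ≤ upper
    · rw [if_pos hi, PySem.List.pyRange_one_cons (by omega)]
      have hlst : pvSubsAuxA (nb.length + 1) nb 0 i [] =
          (PySem.List.pyRange 0 ((nb.length : Int) - i + 1) 1).map
            (fun h => PySem.List.slice nb (some h) (some (h + i))) := by
        have h := pvSubs_eq nb i (nb.length + 1) 0 [] (by omega)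
        simpa using h
      rw [hlst]
      have hlen : (((PySem.List.pyRange 0 ((nb.length : Int) - i + 1) 1).map
          (fun h => PySem.List.slice nb (some h) (some (h + i)))).length : Int) =
          (nb.length : Int) - i + 1 := by
        rw [List.length_map, PySem.List.length_pyRange_one]
        omega
      rw [pvInner_eq _ i (by omega) _ 0 i upper (by omega) (by omega)]
      have hrange : ((((PySem.List.pyRange 0 ((nb.length : Int) - i + 1) 1).map
          (fun h => PySem.List.slice nb (some h) (some (h + i)))).length : Int) - i) =
          (nb.length : Int) - 2 * i + 1 := by omega
      rw [hrange]
      have hany : (PySem.List.pyRange 0 ((nb.length : Int) - 2 * i + 1) 1).any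
            (fun q => PySem.List.pyGetD ((PySem.List.pyRange 0 ((nb.length : Int) - i + 1) 1).map
                (fun h => PySem.List.slice nb (some h) (some (h + i)))) q [] ==
              PySem.List.pyGetD ((PySem.List.pyRange 0 ((nb.length : Int) - i + 1) 1).map
                (fun h => PySem.List.slice nb (some h) (some (h + i)))) (q + i) []) =
          (PySem.List.pyRange 0 ((nb.length : Int) - 2 * i + 1) 1).any
            (fun p => PySem.List.slice nb (some p) (some (p + i)) ==
              PySem.List.slice nb (some (p + i)) (some (p + 2 * i))) := by
        apply PySem.List.any_congr_mem
        intro q hq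
        rw [PySem.List.mem_pyRange_one] at hq
        rw [PySem.List.pyGetD_map_pyRange_of_nonneg _ _ _ _ (by omega) (by omega),
          PySem.List.pyGetD_map_pyRange_of_nonneg _ _ _ _ (by omega) (by omega)]
        have h2 : q + i + i = q + 2 * i := by ring
        rw [h2]
      rw [hany]
      by_cases hA : (PySem.List.pyRange 0 ((nb.length : Int) - 2 * i + 1) 1).any
            (fun p => PySem.List.slice nb (some p) (some (p + i)) ==
              PySem.List.slice nb (some (p + i)) (some (p + 2 * i))) = true
      · rw [if_pos hA]
        show pvOuterA f nb upper (upper + 1 + 1) false =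
          !(_ || (PySem.List.pyRange (i + 1) (upper + 1) 1).any _)
        obtain ⟨f', rfl⟩ : ∃ f', f = f' + 1 := ⟨f - 1, by omega⟩
        simp only [pvOuterA]
        rw [if_neg (by omega)]
        simp [hA]
      · rw [if_neg hA]
        show pvOuterA f nb upper (i + 1) true =
          !(_ || (PySem.List.pyRange (i + 1) (upper + 1) 1).any _)
        rw [ih (i + 1) (by omega) (by omega)]
        simp only [Bool.not_eq_true] at hA
        simp [hA]
    · rw [if_neg hi, PySem.List.pyRange_one_eq_nil (by omega)]
      simp

-- A's admissibility test equals B's square-freeness of B's representation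
lemma pvAdmissible_eq (n b : Int) :
    pvAdmissibleA n b = pvSquarefreeB (pvToBaseB (n.toNat + 1) n b) := by
  have hrep : pvNumber2baseRepA n b = pvToBaseB (n.toNat + 1) n b := by
    rw [pvNumber2baseRepA, pvN2b_eq, List.append_nil]
  simp only [pvAdmissibleA, hrep, pvSquarefreeB]
  set s := pvToBaseB (n.toNat + 1) n b with hs
  set upper := PySem.Int.floordiv ((s.length : Int)) 2 with hupper
  have hmul : upper * 2 + PySem.Int.mod ((s.length : Int)) 2 = (s.length : Int) :=
    PySem.Int.floordiv_mul_add_mod _ _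
  have hmod : 0 ≤ PySem.Int.mod ((s.length : Int)) 2 := PySem.Int.mod_nonneg _ (by omega)
  have hmod2 : PySem.Int.mod ((s.length : Int)) 2 < 2 := PySem.Int.mod_lt _ (by omega)
  have hup0 : 0 ≤ upper := by omega
  rw [pvOuter_eq s upper (by omega) (upper.toNat + 1) 1 le_rfl (by omega)]

-- A's base loop over range(len(L)) returns `some i` iff every remaining base passes
lemma pvBases_eq (i : Int) (L : List Int) :
    ∀ (k : Nat) (j0 : Int) (acc : Option Int), 0 ≤ j0 → j0 < (L.length : Int) →
    ((L.length : Int) - j0).toNat = k →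
    pvBasesA i L (PySem.List.pyRange j0 (L.length : Int) 1) acc =
      (if (PySem.List.pyRange j0 (L.length : Int) 1).all
            (fun j => pvAdmissibleA i (PySem.List.pyGetD L j 0)) then some i else acc) := by
  intro k
  induction k with
  | zero => intro j0 acc h0 hm hk; omega
  | succ k ih =>
    intro j0 acc h0 hm hk
    rw [PySem.List.pyRange_one_cons (by omega)]
    simp only [pvBasesA]
    by_cases ha : pvAdmissibleA i (PySem.List.pyGetD L j0 0) = true
    · rw [if_neg (by simp [ha])]
      by_cases hl : j0 = (L.length : Int) - 1
      · rw [if_pos (by simpa using hl)]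
        rw [show j0 + 1 = (L.length : Int) by omega, PySem.List.pyRange_one_eq_nil le_rfl]
        simp [pvBasesA, ha]
      · rw [if_neg (by simpa using hl)]
        rw [ih (j0 + 1) acc (by omega) (by omega) (by omega)]
        simp [ha]
    · have ha' : pvAdmissibleA i (PySem.List.pyGetD L j0 0) = false := by
        cases h : pvAdmissibleA i (PySem.List.pyGetD L j0 0) <;> simp_all
      rw [if_pos (by simp [ha'])]
      simp [ha']

-- closed form of the base loop from j0 = 0, in terms of B's test
lemma pvBases_closed (i : Int) (L : List Int) (hL : L ≠ []) (acc : Option Int) :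
    pvBasesA i L (PySem.List.pyRange 0 (L.length : Int) 1) acc =
      (if pvGoodB L i then some i else acc) := by
  have hm : 0 < (L.length : Int) := by
    have := List.length_pos_iff.mpr hL
    omega
  rw [pvBases_eq i L L.length 0 acc le_rfl hm (by omega)]
  have hall : (PySem.List.pyRange 0 (L.length : Int) 1).all
      (fun j => pvAdmissibleA i (PySem.List.pyGetD L j 0)) = pvGoodB L i := by
    simp only [pvAdmissible_eq, pvGoodB]
    conv_rhs => rw [← PySem.List.map_pyGetD_pyRange_zero' (xs := L) (d := 0)]
    rw [List.all_map]
    rfl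
  rw [hall]

-- B's early-exit downward loop is find? on the list
lemma pvAltLoop_eq_find (L : List Int) : ∀ ns, pvAltLoopB L ns = ns.find? (pvGoodB L) := by
  intro ns
  induction ns with
  | nil => rfl
  | cons n rest ih => simp only [pvAltLoopB, List.find?]; by_cases h : pvGoodB L n <;> simp [h, ih]

-- a first-match scan of the reversal equals the overwrite fold of the original
lemma pvFind_rev_eq_foldl (g : Int → Bool) (l : List Int) :
    l.reverse.find? g = l.foldl (fun acc n => if g n then some n else acc) none := by
  induction l using List.reverseRecOn with
  | nil => rfl
  | append_singleton l x ih =>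
    rw [List.foldl_append, List.reverse_append]
    simp only [List.foldl_cons, List.foldl_nil, List.reverse_singleton, List.singleton_append,
      List.find?]
    by_cases h : g x <;> simp [h, ih]

-- ===== VERDICT (by name: the statement is the Claim_ definition above) =====
theorem largest_multi_admissible_spec : Claim_equal_largest_multi_admissible := by
  intro L start end_ _hdom _hpre
  unfold Spec_largest_multi_admissible
  by_cases hL : L = []
  · subst hL
    simp [largest_multi_admissible, largest_multi_admissible_alt, pvBasesA,
      PySem.List.pyRange_one_eq_nil]
  · unfold largest_multi_admissible largest_multi_admissible_alt
    rw [if_neg hL, pvAltLoop_eq_find]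
    have hrev : PySem.List.pyRange (end_ - 1) (start - 1) (-1) =
        (PySem.List.pyRange start end_ 1).reverse := by
      rw [PySem.List.pyRange_neg_one_eq_reverse]
      norm_num
    rw [hrev, pvFind_rev_eq_foldl]
    apply PySem.List.foldl_congr_mem
    intro acc x _
    exact pvBases_closed x L hL acc
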